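-- pv_equiv track=rewrite | github.com/Try4W/MagicPewPew | ConsoleRenderingEngine/tools.py | string_to_matrix
-- ===== SOURCE A (Python) =====
-- def string_to_matrix(string):
--     matrix = []
--     y_level = 0
--     matrix.append([])  # Add empty cell to matrix
--     for pix in string:
--         if pix == "\n":
--             y_level += 1
--             matrix.append([])
--         else:
--             matrix[y_level].append(pix)
--     return matrix
-- ===== SOURCE B (Python) =====
-- def string_to_matrix(string):
--     return [list(line) for line in string.split('\n')]
-- ===== Notes on version B (the rewrite author's own statement) =====
-- stated objective: simpler
-- what changed: Replaces the stateful char-by-char pass that maintains a running row index and appends into the matrix with a split-first decomposition: split into lines with str.split, then map each line to its list of characters.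
import Mathlib
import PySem

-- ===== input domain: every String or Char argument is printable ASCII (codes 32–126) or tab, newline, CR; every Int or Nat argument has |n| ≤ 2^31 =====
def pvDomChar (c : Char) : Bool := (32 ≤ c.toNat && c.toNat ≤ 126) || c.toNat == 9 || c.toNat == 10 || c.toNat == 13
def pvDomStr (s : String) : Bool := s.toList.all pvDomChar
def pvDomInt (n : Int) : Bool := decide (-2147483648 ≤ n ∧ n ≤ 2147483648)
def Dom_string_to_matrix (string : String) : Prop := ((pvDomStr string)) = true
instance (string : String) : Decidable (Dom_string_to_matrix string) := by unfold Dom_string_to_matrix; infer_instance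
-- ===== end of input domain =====

-- B replaces A's stateful char-by-char pass (running row index, per-char append) with a
-- split-on-'\n'-then-map-each-line-to-chars decomposition; proved to return the same matrix.

-- ===== PORT A =====
-- matrix[y_level].append(pix): append x to the list at index i (hand port, exact: y_level is always in range)
def pvAppendAt (m : List (List String)) (i : Nat) (x : String) : List (List String) :=
  m.set i ((m.getD i []) ++ [x])

def string_to_matrix (string : String) : List (List String) :=
  -- matrix = []; y_level = 0; matrix.append([])
  let init : List (List String) × Nat := (([] : List (List String)) ++ [[]], 0)
  -- for pix in string: …
  let st := string.toList.foldl (fun (st : List (List String) × Nat) pix =>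
    if pix = '\n' then (st.1 ++ [[]], st.2 + 1)
    else (pvAppendAt st.1 st.2 (String.mk [pix]), st.2)) init
  st.1

-- ===== PORT B =====
def string_to_matrix_alt (string : String) : List (List String) :=
  -- [list(line) for line in string.split('\n')]  (split? is some: the separator is non-empty)
  ((PySem.Str.split? string "\n").getD []).map (fun line => line.toList.map (fun c => String.mk [c]))

-- ===== PRECONDITION & SPEC =====
def Spec_string_to_matrix (string : String) (out : List (List String)) : Prop := out = string_to_matrix_alt string
instance (string : String) (out : List (List String)) : Decidable (Spec_string_to_matrix string out) := by unfold Spec_string_to_matrix; infer_instance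

-- ===== CLAIM (what is proved, stated in full; the proofs are below) =====
def Claim_equal_string_to_matrix : Prop := ∀ (string : String), Dom_string_to_matrix string → Spec_string_to_matrix string (string_to_matrix string)

-- ===== LEMMAS AND PROOFS =====

-- proof-side model: the lines of a char list split on '\n'
def pvConsHead {alpha : Type} (x : List alpha) : List (List alpha) -> List (List alpha)
  | [] => [x]
  | h :: t => (x ++ h) :: t

def pvLines : List Char -> List (List Char)
  | [] => [[]]
  | c :: cs => if c = '\n' then [] :: pvLines cs else pvConsHead [c] (pvLines cs)

def pvFoldRest (cs : List Char) (cur : List String) : List (List String) :=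
  match cs with
  | [] => [cur]
  | c :: cs => if c = '\n' then cur :: pvFoldRest cs [] else pvFoldRest cs (cur ++ [String.mk [c]])

theorem pvLines_ne_nil (cs : List Char) : pvLines cs ≠ [] := by
  cases cs with
  | nil => simp [pvLines]
  | cons c cs =>
    simp only [pvLines]
    split
    · simp
    · cases h : pvLines cs <;> simp [pvConsHead]

theorem pvConsHead_consHead {alpha : Type} (x y : List alpha) (L : List (List alpha)) :
    pvConsHead x (pvConsHead y L) = pvConsHead (x ++ y) L := by
  cases L <;> simp [pvConsHead]

theorem pvGo_spec (fuel : Nat) : ∀ (l cur : List Char) (acc : List (List Char)),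
    l.length ≤ fuel →
    PySem.Chars.splitOn.go ['\n'] fuel l cur acc
      = acc.reverse ++ pvConsHead cur.reverse (pvLines l) := by
  induction fuel with
  | zero =>
    intro l cur acc h
    have : l = [] := List.eq_nil_of_length_eq_zero (Nat.le_zero.mp h)
    subst this
    simp [PySem.Chars.splitOn.go, pvLines, pvConsHead]
  | succ fuel ih =>
    intro l cur acc h
    cases l with
    | nil => simp [PySem.Chars.splitOn.go, pvLines, pvConsHead]
    | cons c rest =>
      rw [PySem.Chars.splitOn.go]
      by_cases hc : c = '\n'
      · subst hc
        have hp : List.isPrefixOf ['\n'] ('\n' :: rest) = true := by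
          simp [List.isPrefixOf]
        simp only [hp, if_pos]
        rw [show List.drop ['\n'].length ('\n' :: rest) = rest from rfl]
        rw [ih rest [] (cur.reverse :: acc) (by simpa using Nat.le_of_succ_le_succ h)]
        have := pvLines_ne_nil rest
        cases hr : pvLines rest with
        | nil => exact absurd hr this
        | cons a b => simp [pvLines, pvConsHead, hr]
      · have hp : List.isPrefixOf ['\n'] (c :: rest) = false := by
          simp [List.isPrefixOf]
          exact fun h' => absurd h'.symm hc
        simp only [hp, Bool.false_eq_true, if_neg, not_false_iff]
        rw [ih rest (c :: cur) acc (by simpa using Nat.le_of_succ_le_succ h)]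
        simp [pvLines, hc, pvConsHead_consHead]

theorem pvSplitOn_newline (cs : List Char) :
    PySem.Chars.splitOn cs ['\n'] = pvLines cs := by
  rw [PySem.Chars.splitOn, pvGo_spec (cs.length + 1) cs [] [] (Nat.le_succ _)]
  have := pvLines_ne_nil cs
  cases hr : pvLines cs with
  | nil => exact absurd hr this
  | cons a b => simp [pvConsHead]

theorem pvAppendAt_last (done : List (List String)) (cur : List String) (x : String) :
    pvAppendAt (done ++ [cur]) done.length x = done ++ [cur ++ [x]] := by
  simp [pvAppendAt, List.getD, List.getElem?_append_right]

theorem pvFold_spec (cs : List Char) : ∀ (done : List (List String)) (cur : List String),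
    (cs.foldl (fun (st : List (List String) × Nat) pix =>
        if pix = '\n' then (st.1 ++ [[]], st.2 + 1)
        else (pvAppendAt st.1 st.2 (String.mk [pix]), st.2)) (done ++ [cur], done.length)).1
      = done ++ pvFoldRest cs cur := by
  induction cs with
  | nil => intro done cur; simp [pvFoldRest]
  | cons c cs ih =>
    intro done cur
    by_cases hc : c = '\n'
    · subst hc
      simp only [List.foldl_cons, if_pos rfl]
      simp only [reduceIte]
      rw [show done.length + 1 = (done ++ [cur]).length by simp]
      rw [show done ++ [cur] ++ [[]] = (done ++ [cur]) ++ [([] : List String)] from rfl]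
      rw [ih (done ++ [cur]) []]
      simp [pvFoldRest]
    · simp only [List.foldl_cons, if_neg hc]
      rw [pvAppendAt_last, ih done (cur ++ [String.mk [c]])]
      simp [pvFoldRest, hc]

theorem pvMap_consHead (c : Char) (L : List (List Char)) :
    (pvConsHead [c] L).map (fun l => l.map (fun d => String.mk [d]))
      = pvConsHead [String.mk [c]] (L.map (fun l => l.map (fun d => String.mk [d]))) := by
  cases L <;> simp [pvConsHead]

theorem pvFoldRest_eq (cs : List Char) : ∀ (cur : List String),
    pvFoldRest cs cur
      = pvConsHead cur ((pvLines cs).map (fun l => l.map (fun d => String.mk [d]))) := by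
  induction cs with
  | nil => intro cur; simp [pvFoldRest, pvLines, pvConsHead]
  | cons c cs ih =>
    intro cur
    by_cases hc : c = '\n'
    · subst hc
      simp only [pvFoldRest, if_pos rfl, pvLines]
      rw [ih []]
      have := pvLines_ne_nil cs
      cases hr : pvLines cs with
      | nil => exact absurd hr this
      | cons a b => simp [pvConsHead, hr]
    · simp only [pvFoldRest, if_neg hc, pvLines]
      rw [ih (cur ++ [String.mk [c]]), pvMap_consHead, pvConsHead_consHead]

-- ===== VERDICT (by name: the statement is the Claim_ definition above) =====
theorem string_to_matrix_spec : Claim_equal_string_to_matrix := by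
  intro s _
  unfold Spec_string_to_matrix string_to_matrix string_to_matrix_alt
  simp only []
  have hA := pvFold_spec s.toList [] []
  simp only [List.nil_append, List.length_nil] at hA ⊢
  rw [hA, pvFoldRest_eq]
  have hB : PySem.Str.split? s "\n"
      = some ((PySem.Chars.splitOn s.toList ['\n']).map String.ofList) := by
    simp [PySem.Str.split?, PySem.Chars.split?]
  rw [hB, pvSplitOn_newline]
  have := pvLines_ne_nil s.toList
  cases hr : pvLines s.toList with
  | nil => exact absurd hr this
  | cons a b =>
    simp [pvConsHead, Option.getD, List.map_map, Function.comp, String.toList_ofList]
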